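-- pv_equiv track=rewrite | github.com/QiyaoYin/csgo | Account/accountPool.py | setCookieAndToken
-- ===== SOURCE A (Python) =====
-- def setCookieAndToken(cookieList: list) -> tuple:
--     '''
--         process cookie map to cookie str and token str.
--     '''
--     cookie_map = cookieList
--     cookie = ''
--     deviceId = ''
--     LocaleSupported = ''
--     game = ''
--     NTES_YD_SESS = ''
--     S_INFO = ''
--     P_INFO = ''
--     remember_me = ''
--     session = ''
--     csrf_token = ''
--     for _map in cookie_map:
--         if(_map['name'] == 'csrf_token'):
--             csrf_token = _map['value']
--         elif(_map['name'] == 'Device-Id'):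
--             deviceId = 'Device-Id=' + _map['value'] + '; '
--         elif(_map['name'] == 'Locale-Supported'):
--             LocaleSupported = 'Locale-Supported=' + _map['value'] + '; '
--         elif(_map['name'] == 'game'):
--             game = 'game=' + _map['value'] + '; '
--         elif(_map['name'] == 'NTES_YD_SESS'):
--             NTES_YD_SESS = 'NTES_YD_SESS=' + _map['value'] + '; '
--         elif(_map['name'] == 'S_INFO'):
--             S_INFO ='S_INFO=' + _map['value'] + '; '
--         elif(_map['name'] == 'P_INFO'):
--             P_INFO = 'P_INFO=' + _map['value'] + '; '
--         elif(_map['name'] == 'remember_me'):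
--             remember_me = 'remember_me=' + _map['value'] + '; '
--         elif(_map['name'] == 'session'):
--             session = 'session=' + _map['value'] + '; '
--     cookie = deviceId + LocaleSupported + game + NTES_YD_SESS + S_INFO + P_INFO + remember_me + session
--     return cookie, csrf_token
-- ===== SOURCE B (Python) =====
-- _ORDER = ('Device-Id', 'Locale-Supported', 'game', 'NTES_YD_SESS',
--           'S_INFO', 'P_INFO', 'remember_me', 'session')
--
-- def _last_value(cookieList, name):
--     """Value of the last entry whose name is `name` (reverse linear search), or None."""
--     for m in reversed(cookieList):
--         if m['name'] == name:
--             return m['value']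
--     return None
--
-- def setCookieAndToken(cookieList: list) -> tuple:
--     '''
--         process cookie map to cookie str and token str.
--     '''
--     cookie = ''
--     for n in _ORDER:
--         v = _last_value(cookieList, n)
--         if v is not None:
--             cookie += n + '=' + v + '; '
--     tok = _last_value(cookieList, 'csrf_token')
--     return cookie, tok if tok is not None else ''
-- ===== Notes on version B (the rewrite author's own statement) =====
-- stated objective: alternative
-- what changed: Replaces A's single accumulating pass with a nine-variable elif chain by nine independent per-name reverse linear searches: for each known cookie name the list is scanned from the end for its last occurrence, and the cookie string is assembled over a fixed ordered template.
import Mathlib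
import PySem

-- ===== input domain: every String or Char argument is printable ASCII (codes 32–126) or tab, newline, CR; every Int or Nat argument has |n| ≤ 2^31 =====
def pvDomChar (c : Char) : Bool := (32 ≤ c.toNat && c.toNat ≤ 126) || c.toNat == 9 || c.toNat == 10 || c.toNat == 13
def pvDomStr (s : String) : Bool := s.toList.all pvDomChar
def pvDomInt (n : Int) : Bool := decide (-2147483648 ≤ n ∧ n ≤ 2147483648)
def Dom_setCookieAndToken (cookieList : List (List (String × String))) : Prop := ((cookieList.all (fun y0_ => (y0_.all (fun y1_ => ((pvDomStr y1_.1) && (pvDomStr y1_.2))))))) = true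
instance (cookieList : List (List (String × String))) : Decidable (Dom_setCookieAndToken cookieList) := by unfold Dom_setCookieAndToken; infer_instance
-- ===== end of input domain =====

-- B replaces A's single accumulating pass (nine state variables, one elif chain) by nine
-- independent per-name reverse searches (last occurrence of each known name); objective: alternative.

-- ===== PORT A =====
structure AState where
  deviceId : String
  localeSupported : String
  game : String
  ntesYdSess : String
  sInfo : String
  pInfo : String
  rememberMe : String
  session : String
  csrfToken : String
deriving DecidableEq, Repr

-- loop body of A's for-loop (the elif chain, branches in A's order)
def aStep (st : AState) (m : List (String × String)) : AState :=
  let md := PySem.Dict.mk m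
  let n := md.getD "name" ""          -- _map['name']; Pre_ guarantees the key is present
  if n = "csrf_token" then { st with csrfToken := md.getD "value" "" }
  else if n = "Device-Id" then { st with deviceId := "Device-Id=" ++ md.getD "value" "" ++ "; " }
  else if n = "Locale-Supported" then { st with localeSupported := "Locale-Supported=" ++ md.getD "value" "" ++ "; " }
  else if n = "game" then { st with game := "game=" ++ md.getD "value" "" ++ "; " }
  else if n = "NTES_YD_SESS" then { st with ntesYdSess := "NTES_YD_SESS=" ++ md.getD "value" "" ++ "; " }
  else if n = "S_INFO" then { st with sInfo := "S_INFO=" ++ md.getD "value" "" ++ "; " }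
  else if n = "P_INFO" then { st with pInfo := "P_INFO=" ++ md.getD "value" "" ++ "; " }
  else if n = "remember_me" then { st with rememberMe := "remember_me=" ++ md.getD "value" "" ++ "; " }
  else if n = "session" then { st with session := "session=" ++ md.getD "value" "" ++ "; " }
  else st

def setCookieAndToken (cookieList : List (List (String × String))) : String × String :=
  let st := cookieList.foldl aStep ⟨"", "", "", "", "", "", "", "", ""⟩
  (st.deviceId ++ st.localeSupported ++ st.game ++ st.ntesYdSess ++ st.sInfo ++
     st.pInfo ++ st.rememberMe ++ st.session, st.csrfToken)

-- ===== PORT B =====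
def pvOrder : List String :=
  ["Device-Id", "Locale-Supported", "game", "NTES_YD_SESS",
   "S_INFO", "P_INFO", "remember_me", "session"]

-- _last_value's reverse for-loop with early return, as structural recursion over the
-- reversed list: first element (of the reversed list) whose m['name'] equals `name`.
def lastValueRev (revList : List (List (String × String))) (name : String) : Option String :=
  match revList with
  | [] => none
  | m :: t =>
      if (PySem.Dict.mk m).getD "name" "" = name    -- m['name']; Pre_ guarantees it is present
      then some ((PySem.Dict.mk m).getD "value" "")   -- m['value']; Pre_ guarantees it is present
      else lastValueRev t name

def setCookieAndToken_alt (cookieList : List (List (String × String))) : String × String :=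
  let rev := cookieList.reverse
  let cookie := pvOrder.foldl
    (fun acc n =>
      match lastValueRev rev n with
      | some v => acc ++ (n ++ "=" ++ v ++ "; ")
      | none => acc) ""
  let tok := match lastValueRev rev "csrf_token" with
    | some t => t
    | none => ""
  (cookie, tok)

-- ===== PRECONDITION & SPEC =====
-- Pre_ excludes exactly the inputs where Python A raises KeyError: an element without a
-- 'name' key, or one whose name is a known cookie name but which lacks a 'value' key.
def Pre_setCookieAndToken (cookieList : List (List (String × String))) : Prop :=
  ∀ m ∈ cookieList, (PySem.Dict.mk m).contains "name" = true ∧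
    ((PySem.Dict.mk m).getD "name" "" ∈ ("csrf_token" :: pvOrder) → (PySem.Dict.mk m).contains "value" = true)
instance (cookieList : List (List (String × String))) : Decidable (Pre_setCookieAndToken cookieList) := by unfold Pre_setCookieAndToken; infer_instance

def pvWitness_setCookieAndToken : (List (List (String × String))) :=
  [[("name", "Device-Id"), ("value", "d1")], [("name", "csrf_token"), ("value", "tok")]]

def Spec_setCookieAndToken (cookieList : List (List (String × String))) (out : String × String) : Prop := out = setCookieAndToken_alt cookieList
instance (cookieList : List (List (String × String))) (out : String × String) : Decidable (Spec_setCookieAndToken cookieList out) := by unfold Spec_setCookieAndToken; infer_instance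

-- ===== CLAIM (what is proved, stated in full; the proofs are below) =====
def Claim_equal_setCookieAndToken : Prop := ∀ (cookieList : List (List (String × String))), Dom_setCookieAndToken cookieList → Pre_setCookieAndToken cookieList → Spec_setCookieAndToken cookieList (setCookieAndToken cookieList)

-- ===== LEMMAS AND PROOFS =====

-- the cookie fragment a name contributes, with a default for 'name absent'
def gval (rev : List (List (String × String))) (n dflt : String) : String :=
  match lastValueRev rev n with
  | some v => n ++ "=" ++ v ++ "; "
  | none => dflt

def tokval (rev : List (List (String × String))) (dflt : String) : String :=
  match lastValueRev rev "csrf_token" with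
  | some v => v
  | none => dflt

theorem lastValueRev_append (xs ys : List (List (String × String))) (n : String) :
    lastValueRev (xs ++ ys) n = (lastValueRev xs n).or (lastValueRev ys n) := by
  induction xs with
  | nil => simp [lastValueRev]
  | cons m t ih =>
      simp only [List.cons_append, lastValueRev]
      split_ifs with h <;> simp [ih]

theorem gval_append (xs ys : List (List (String × String))) (n d : String) :
    gval (xs ++ ys) n d = gval xs n (gval ys n d) := by
  simp only [gval, lastValueRev_append]
  cases lastValueRev xs n <;> simp [Option.or]

theorem tokval_append (xs ys : List (List (String × String))) (d : String) :
    tokval (xs ++ ys) d = tokval xs (tokval ys d) := by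
  simp only [tokval, lastValueRev_append]
  cases lastValueRev xs "csrf_token" <;> simp [Option.or]

-- one step of A's loop, expressed through the single-element searches
theorem aStep_eq (st : AState) (m : List (String × String)) :
    aStep st m =
      ⟨gval [m] "Device-Id" st.deviceId, gval [m] "Locale-Supported" st.localeSupported,
       gval [m] "game" st.game, gval [m] "NTES_YD_SESS" st.ntesYdSess,
       gval [m] "S_INFO" st.sInfo, gval [m] "P_INFO" st.pInfo,
       gval [m] "remember_me" st.rememberMe, gval [m] "session" st.session,
       tokval [m] st.csrfToken⟩ := by
  by_cases h1 : (PySem.Dict.mk m).getD "name" "" = "csrf_token"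
  · simp [aStep, gval, tokval, lastValueRev, h1]
  · by_cases h2 : (PySem.Dict.mk m).getD "name" "" = "Device-Id"
    · simp [aStep, gval, tokval, lastValueRev, h2]
    · by_cases h3 : (PySem.Dict.mk m).getD "name" "" = "Locale-Supported"
      · simp [aStep, gval, tokval, lastValueRev, h3]
      · by_cases h4 : (PySem.Dict.mk m).getD "name" "" = "game"
        · simp [aStep, gval, tokval, lastValueRev, h4]
        · by_cases h5 : (PySem.Dict.mk m).getD "name" "" = "NTES_YD_SESS"
          · simp [aStep, gval, tokval, lastValueRev, h5]
          · by_cases h6 : (PySem.Dict.mk m).getD "name" "" = "S_INFO"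
            · simp [aStep, gval, tokval, lastValueRev, h6]
            · by_cases h7 : (PySem.Dict.mk m).getD "name" "" = "P_INFO"
              · simp [aStep, gval, tokval, lastValueRev, h7]
              · by_cases h8 : (PySem.Dict.mk m).getD "name" "" = "remember_me"
                · simp [aStep, gval, tokval, lastValueRev, h8]
                · by_cases h9 : (PySem.Dict.mk m).getD "name" "" = "session"
                  · simp [aStep, gval, tokval, lastValueRev, h9]
                  · simp [aStep, gval, tokval, lastValueRev, h1, h2, h3, h4, h5, h6, h7, h8, h9]

-- A's whole loop computes exactly the per-name last-occurrence values
theorem loopEq (l : List (List (String × String))) (st : AState) :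
    l.foldl aStep st =
      ⟨gval l.reverse "Device-Id" st.deviceId, gval l.reverse "Locale-Supported" st.localeSupported,
       gval l.reverse "game" st.game, gval l.reverse "NTES_YD_SESS" st.ntesYdSess,
       gval l.reverse "S_INFO" st.sInfo, gval l.reverse "P_INFO" st.pInfo,
       gval l.reverse "remember_me" st.rememberMe, gval l.reverse "session" st.session,
       tokval l.reverse st.csrfToken⟩ := by
  induction l generalizing st with
  | nil => simp [gval, tokval, lastValueRev]
  | cons m t ih =>
      rw [List.foldl_cons, ih, aStep_eq]
      simp only [List.reverse_cons, gval_append, tokval_append]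

-- B's assembly foldl, flattened to a plain concatenation
theorem foldl_cookie (l : List String) (rev : List (List (String × String))) (s : String) :
    l.foldl (fun acc n =>
        match lastValueRev rev n with
        | some v => acc ++ (n ++ "=" ++ v ++ "; ")
        | none => acc) s
    = s ++ l.foldr (fun n r => gval rev n "" ++ r) "" := by
  induction l generalizing s with
  | nil => simp
  | cons n t ih =>
      cases h : lastValueRev rev n with
      | none =>
          simp only [List.foldl_cons, List.foldr_cons, h]
          rw [ih]; simp [gval, h]
      | some v =>
          simp only [List.foldl_cons, List.foldr_cons, h]
          rw [ih]; simp [gval, h, String.append_assoc]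

-- ===== VERDICT (by name: the statement is the Claim_ definition above) =====
theorem setCookieAndToken_spec : Claim_equal_setCookieAndToken := by
  intro cookieList _ _
  show setCookieAndToken cookieList = setCookieAndToken_alt cookieList
  simp only [setCookieAndToken, setCookieAndToken_alt, loopEq, foldl_cookie]
  simp [pvOrder, tokval, String.append_assoc]
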